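-- pv_equiv track=rewrite | github.com/tkimurabusiness-debug/geo-monitor | api/app/services/reports/generator.py | _compute_keyword_changes
-- ===== SOURCE A (Python) =====
-- def _compute_keyword_changes(monitoring: list[dict]) -> list[dict]:
--     """Compute rank changes per keyword over the period."""
--     # Group by keyword, get first and last rank
--     kw_history: dict[str, list[dict]] = {}
--     for m in monitoring:
--         kid = m["keyword_id"]
--         kw_history.setdefault(kid, []).append(m)
--
--     changes = []
--     for kid, entries in kw_history.items():
--         mentioned_entries = [e for e in entries if e.get("brand_rank")]
--         if len(mentioned_entries) < 2:
--             continue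
--         first = mentioned_entries[0]["brand_rank"]
--         last = mentioned_entries[-1]["brand_rank"]
--         change = first - last  # positive = improved
--         changes.append({"keyword_id": kid, "from_rank": first, "to_rank": last, "change": change})
--
--     changes.sort(key=lambda c: c["change"], reverse=True)
--     return changes
-- ===== SOURCE B (Python) =====
-- def _compute_keyword_changes(monitoring: list[dict]) -> list[dict]:
--     """Single pass: per keyword keep (first_mentioned_rank, last_mentioned_rank, mentioned_count)."""
--     stats: dict = {}
--     for m in monitoring:
--         kid = m["keyword_id"]
--         first, last, cnt = stats.get(kid, (0, 0, 0))
--         r = m.get("brand_rank")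
--         if r:
--             stats[kid] = ((r if cnt == 0 else first), r, cnt + 1)
--         else:
--             stats[kid] = (first, last, cnt)
--     changes = [
--         {"keyword_id": kid, "from_rank": first, "to_rank": last, "change": first - last}
--         for kid, (first, last, cnt) in stats.items()
--         if cnt >= 2
--     ]
--     changes.sort(key=lambda c: c["change"], reverse=True)
--     return changes
-- ===== Notes on version B (the rewrite author's own statement) =====
-- stated objective: alternative
-- what changed: Replaces the group-by-keyword dict of full entry lists plus a second per-group filter/index pass by a single pass that maintains only (first_mentioned_rank, last_mentioned_rank, mentioned_count) per keyword, then emits and sorts the changes; Pre_ only excludes inputs where A raises KeyError (entry without 'keyword_id').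
import Mathlib
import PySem

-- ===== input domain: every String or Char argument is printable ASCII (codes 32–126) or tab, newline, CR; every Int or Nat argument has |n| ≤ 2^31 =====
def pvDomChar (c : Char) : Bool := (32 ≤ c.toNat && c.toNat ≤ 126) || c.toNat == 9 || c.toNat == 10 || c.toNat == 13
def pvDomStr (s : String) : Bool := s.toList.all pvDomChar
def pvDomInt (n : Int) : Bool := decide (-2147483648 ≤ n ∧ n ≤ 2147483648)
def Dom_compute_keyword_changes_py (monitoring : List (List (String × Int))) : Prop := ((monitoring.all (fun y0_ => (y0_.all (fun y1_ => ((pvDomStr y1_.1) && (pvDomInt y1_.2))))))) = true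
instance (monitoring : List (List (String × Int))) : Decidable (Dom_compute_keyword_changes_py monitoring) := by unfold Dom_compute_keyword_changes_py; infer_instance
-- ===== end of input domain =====

-- B replaces A's group-by dict of full entry lists + second per-group pass by a single pass keeping
-- (first_mentioned_rank, last_mentioned_rank, mentioned_count) per keyword; same cost, return value only.

-- ===== PORT A =====
-- m["keyword_id"]: Pre_ excludes entries without the key (Python KeyError), so the .getD 0 default is never reached
def pvKid (m : List (String × Int)) : Int := (m.lookup "keyword_id").getD 0
-- truthiness of m.get("brand_rank"): an absent key or rank 0 is falsy
def pvTruthy (m : List (String × Int)) : Bool :=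
  match m.lookup "brand_rank" with
  | some v => v != 0
  | none => false

def compute_keyword_changes_py (monitoring : List (List (String × Int))) : List (List (String × Int)) :=
  let kw_history : PySem.Dict Int (List (List (String × Int))) :=
    monitoring.foldl (fun d m => d.modify (pvKid m) [] (fun l => l ++ [m])) PySem.Dict.empty
  let changes : List (List (String × Int)) :=
    kw_history.items.foldl (fun acc kv =>
      let mentioned := kv.2.filter pvTruthy
      if mentioned.length < 2 then acc
      else
        -- mentioned_entries[0]["brand_rank"] / [-1]["brand_rank"]: the guard makes the index and the
        -- key lookup total, so the .getD 0 defaults are never reached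
        let first := ((PySem.List.pyGet? mentioned 0).bind (fun e => e.lookup "brand_rank")).getD 0
        let last := ((PySem.List.pyGet? mentioned (-1)).bind (fun e => e.lookup "brand_rank")).getD 0
        acc ++ [[("keyword_id", kv.1), ("from_rank", first), ("to_rank", last), ("change", first - last)]]) []
  PySem.List.sorted changes (fun c => (c.lookup "change").getD 0) true

-- ===== PORT B =====
-- one step of B's pass: fold m into the (first, last, count) summary of its keyword
def pvBStep (s : Int × Int × Int) (m : List (String × Int)) : Int × Int × Int :=
  match m.lookup "brand_rank" with
  | some r => if r != 0 then ((if s.2.2 == 0 then r else s.1), r, s.2.2 + 1) else s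
  | none => s

def compute_keyword_changes_py_alt (monitoring : List (List (String × Int))) : List (List (String × Int)) :=
  let stats : PySem.Dict Int (Int × Int × Int) :=
    monitoring.foldl (fun d m => d.insert (pvKid m) (pvBStep (d.getD (pvKid m) (0, 0, 0)) m)) PySem.Dict.empty
  let changes : List (List (String × Int)) :=
    stats.items.filterMap (fun kv =>
      if kv.2.2.2 ≥ 2 then
        some [("keyword_id", kv.1), ("from_rank", kv.2.1), ("to_rank", kv.2.2.1), ("change", kv.2.1 - kv.2.2.1)]
      else none)
  PySem.List.sorted changes (fun c => (c.lookup "change").getD 0) true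

-- ===== PRECONDITION & SPEC =====
-- Pre_ excludes exactly the inputs on which A raises KeyError: an entry without the "keyword_id" key
def Pre_compute_keyword_changes_py (monitoring : List (List (String × Int))) : Prop :=
  (monitoring.all (fun m => (m.lookup "keyword_id").isSome)) = true
instance (monitoring : List (List (String × Int))) : Decidable (Pre_compute_keyword_changes_py monitoring) := by
  unfold Pre_compute_keyword_changes_py; infer_instance

def pvWitness_compute_keyword_changes_py : (List (List (String × Int))) :=
  [[("keyword_id", 1), ("brand_rank", 5)], [("keyword_id", 1), ("brand_rank", 2)]]

def Spec_compute_keyword_changes_py (monitoring : List (List (String × Int))) (out : List (List (String × Int))) : Prop := out = compute_keyword_changes_py_alt monitoring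
instance (monitoring : List (List (String × Int))) (out : List (List (String × Int))) : Decidable (Spec_compute_keyword_changes_py monitoring out) := by unfold Spec_compute_keyword_changes_py; infer_instance

-- ===== CLAIM (what is proved, stated in full; the proofs are below) =====
def Claim_equal_compute_keyword_changes_py : Prop := ∀ (monitoring : List (List (String × Int))), Dom_compute_keyword_changes_py monitoring → Pre_compute_keyword_changes_py monitoring → Spec_compute_keyword_changes_py monitoring (compute_keyword_changes_py monitoring)

-- ===== LEMMAS AND PROOFS =====

-- the rank a truthy entry contributes
def pvVal (m : List (String × Int)) : Int := (m.lookup "brand_rank").getD 0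
-- the rank of an entry if mentioned (truthy), none otherwise
def pvRank? (m : List (String × Int)) : Option Int :=
  match m.lookup "brand_rank" with
  | some v => if v != 0 then some v else none
  | none => none
-- B's per-keyword summary of a list of entries
def pvSumm (es : List (List (String × Int))) : Int × Int × Int := es.foldl pvBStep (0, 0, 0)

theorem pv_pyGet?_zero {α : Type} (xs : List α) (h : xs ≠ []) :
    PySem.List.pyGet? xs 0 = xs.head? := by
  cases xs with
  | nil => exact absurd rfl h
  | cons a t => simp [PySem.List.pyGet?, PySem.List.pyIdx?]

theorem pv_pyGet?_neg_one {α : Type} (xs : List α) (h : xs ≠ []) :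
    PySem.List.pyGet? xs (-1) = xs.getLast? := by
  have h1 : 1 ≤ xs.length := List.length_pos_iff.mpr h
  unfold PySem.List.pyGet? PySem.List.pyIdx?
  rw [if_neg (by omega), if_pos (by omega)]
  have h2 : (-(-1 : Int)).toNat = 1 := rfl
  rw [h2, List.getLast?_eq_getElem?]
  rfl

theorem pv_lookup_of_truthy (m : List (String × Int)) (h : pvTruthy m = true) :
    m.lookup "brand_rank" = some (pvVal m) := by
  unfold pvTruthy at h
  unfold pvVal
  cases hm : m.lookup "brand_rank" <;> simp [hm] at h ⊢

theorem pv_filterMap_rank (es : List (List (String × Int))) :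
    es.filterMap pvRank? = (es.filter pvTruthy).map pvVal := by
  induction es with
  | nil => rfl
  | cons e t ih =>
    simp only [List.filterMap_cons, List.filter_cons]
    cases hm : e.lookup "brand_rank" with
    | none =>
      have h1 : pvRank? e = none := by simp [pvRank?, hm]
      have h2 : pvTruthy e = false := by simp [pvTruthy, hm]
      simp [h1, h2, ih]
    | some v =>
      by_cases hv : v = 0
      · have h1 : pvRank? e = none := by simp [pvRank?, hm, hv]
        have h2 : pvTruthy e = false := by simp [pvTruthy, hm, hv]
        simp [h1, h2, ih]
      · have h1 : pvRank? e = some (pvVal e) := by simp [pvRank?, pvVal, hm, hv]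
        have h2 : pvTruthy e = true := by simp [pvTruthy, hm, hv]
        simp [h1, h2, ih]

theorem pv_summ_spec (es : List (List (String × Int))) :
    pvSumm es = ((es.filterMap pvRank?).headD 0, (es.filterMap pvRank?).getLastD 0,
                 ((es.filterMap pvRank?).length : Int)) := by
  induction es using List.reverseRecOn with
  | nil => rfl
  | append_singleton t e ih =>
    unfold pvSumm at ih ⊢
    rw [List.foldl_append, List.filterMap_append, ih]
    simp only [List.foldl_cons, List.foldl_nil]
    cases hm : e.lookup "brand_rank" with
    | none =>
      have hb : pvRank? e = none := by simp [pvRank?, hm]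
      simp [pvBStep, hm, hb]
    | some v =>
      by_cases hv : v = 0
      · have hb : pvRank? e = none := by simp [pvRank?, hm, hv]
        simp [pvBStep, hm, hv, hb]
      · have hb : pvRank? e = some v := by simp [pvRank?, hm, hv]
        simp only [List.filterMap_cons, List.filterMap_nil, hb]
        simp only [pvBStep, hm]
        rw [if_pos (by simp [hv])]
        cases hrs2 : t.filterMap pvRank? with
        | nil => simp
        | cons r rt =>
          have hif : ((((r :: rt).length : Int)) == 0) = false := by
            rw [beq_eq_false_iff_ne]
            intro hcontra
            have h2 : (r :: rt).length = 0 := by exact_mod_cast hcontra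
            exact Nat.succ_ne_zero _ h2
          simp only [Prod.mk.injEq]
          refine ⟨?_, ?_, ?_⟩
          · rw [hif]
            simp
          · rw [List.getLastD_concat]
          · simp

theorem pv_getD_bfold (l : List (List (String × Int))) (d : PySem.Dict Int (Int × Int × Int)) (c : Int) :
    (l.foldl (fun d m => d.insert (pvKid m) (pvBStep (d.getD (pvKid m) (0, 0, 0)) m)) d).getD c (0, 0, 0)
      = (l.filter (fun m => pvKid m == c)).foldl pvBStep (d.getD c (0, 0, 0)) := by
  induction l generalizing d with
  | nil => rfl
  | cons m t ih =>
    simp only [List.foldl_cons, List.filter_cons]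
    rw [ih]
    by_cases hk : pvKid m = c
    · simp [hk]
    · have hk2 : ¬ c = pvKid m := fun hh => hk hh.symm
      simp [hk, hk2, PySem.Dict.getD_insert]

theorem pv_foldl_guard {α β : Type} (K : List α) (c : α → Prop) [DecidablePred c] (h : α → β) (acc : List β) :
    K.foldl (fun a k => if c k then a else a ++ [h k]) acc
      = acc ++ K.filterMap (fun k => if c k then none else some (h k)) := by
  induction K generalizing acc with
  | nil => simp
  | cons k t ih =>
    simp only [List.foldl_cons, List.filterMap_cons]
    by_cases hc : c k
    · simp [hc, ih]
    · rw [if_neg hc, ih, if_neg hc, List.append_assoc]; rfl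

theorem pv_item_eq (k : Int) (es : List (List (String × Int))) :
    (if (es.filter pvTruthy).length < 2 then (none : Option (List (String × Int)))
     else
       some [("keyword_id", k),
             ("from_rank", (((PySem.List.pyGet? (es.filter pvTruthy) 0).bind (fun e => e.lookup "brand_rank")).getD 0)),
             ("to_rank", (((PySem.List.pyGet? (es.filter pvTruthy) (-1)).bind (fun e => e.lookup "brand_rank")).getD 0)),
             ("change", (((PySem.List.pyGet? (es.filter pvTruthy) 0).bind (fun e => e.lookup "brand_rank")).getD 0)
                        - (((PySem.List.pyGet? (es.filter pvTruthy) (-1)).bind (fun e => e.lookup "brand_rank")).getD 0))])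
      = (if (pvSumm es).2.2 ≥ 2 then
           some [("keyword_id", k), ("from_rank", (pvSumm es).1), ("to_rank", (pvSumm es).2.1),
                 ("change", (pvSumm es).1 - (pvSumm es).2.1)]
         else none) := by
  have hmap : es.filterMap pvRank? = (es.filter pvTruthy).map pvVal := pv_filterMap_rank es
  rw [pv_summ_spec es, hmap]
  by_cases hlen : (es.filter pvTruthy).length < 2
  · rw [if_pos hlen, if_neg (by simp; omega)]
  · have hne : es.filter pvTruthy ≠ [] := by
      intro hnil; rw [hnil] at hlen; simp at hlen
    rw [if_neg hlen, if_pos (by simp; omega)]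
    rw [pv_pyGet?_zero _ hne, pv_pyGet?_neg_one _ hne]
    have hfirst : ((es.filter pvTruthy).head?.bind (fun e => e.lookup "brand_rank")).getD 0
        = (((es.filter pvTruthy).map pvVal).headD 0) := by
      cases hm : es.filter pvTruthy with
      | nil => exact absurd hm hne
      | cons a t =>
        have ha : pvTruthy a = true := by
          have : a ∈ es.filter pvTruthy := by rw [hm]; exact List.mem_cons_self
          exact (List.mem_filter.mp this).2
        simp [pv_lookup_of_truthy a ha]
    have hlast : ((es.filter pvTruthy).getLast?.bind (fun e => e.lookup "brand_rank")).getD 0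
        = (((es.filter pvTruthy).map pvVal).getLastD 0) := by
      rw [List.getLastD_eq_getLast?, List.getLast?_map]
      rw [List.getLast?_eq_some_getLast hne]
      have hb : (es.filter pvTruthy).getLast hne ∈ es.filter pvTruthy := List.getLast_mem hne
      have hbt : pvTruthy ((es.filter pvTruthy).getLast hne) = true := (List.mem_filter.mp hb).2
      show (((es.filter pvTruthy).getLast hne).lookup "brand_rank").getD 0
          = (some (pvVal ((es.filter pvTruthy).getLast hne))).getD 0
      rw [pv_lookup_of_truthy _ hbt]
    rw [hfirst, hlast]

-- ===== VERDICT (by name: the statement is the Claim_ definition above) =====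
theorem pv_itemsA (mon : List (List (String × Int))) :
    (List.foldl (fun d m => d.modify (pvKid m) [] (fun l => l ++ [m])) PySem.Dict.empty mon).items
      = (PySem.Set.ofList (mon.map pvKid)).map
          (fun k => (k, mon.filter (fun m => pvKid m == k))) := by
  have hnd : (List.foldl (fun d m => d.modify (pvKid m) [] (fun l => l ++ [m])) PySem.Dict.empty mon).keys.Nodup := by
    apply PySem.Dict.nodup_keys_foldl_modify_key mon pvKid [] (fun _ m l => l ++ [m])
    simp [PySem.Dict.keys_empty]
  rw [PySem.Dict.items_eq_map_keys _ hnd []]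
  rw [PySem.Dict.keys_foldl_modify_key mon pvKid [] (fun _ m l => l ++ [m])]
  rw [PySem.Dict.keys_empty, PySem.Set.update_nil_left]
  apply List.map_congr_left
  intro k _
  have h1 : List.foldl (fun d m => d.modify (pvKid m) [] (fun l => l ++ [m])) PySem.Dict.empty mon
      = (mon.map (fun m => (pvKid m, m))).foldl (fun d p => d.modify p.1 [] (fun l => l ++ [p.2])) PySem.Dict.empty := by
    rw [List.foldl_map]
  rw [h1, PySem.Dict.getD_foldl_modify_append, PySem.Dict.getD_empty, List.nil_append]
  rw [List.filter_map]
  simp [Function.comp_def]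

theorem pv_itemsB (mon : List (List (String × Int))) :
    (List.foldl (fun d m => d.insert (pvKid m) (pvBStep (d.getD (pvKid m) (0, 0, 0)) m)) PySem.Dict.empty mon).items
      = (PySem.Set.ofList (mon.map pvKid)).map
          (fun k => (k, pvSumm (mon.filter (fun m => pvKid m == k)))) := by
  have hnd : (List.foldl (fun d m => d.insert (pvKid m) (pvBStep (d.getD (pvKid m) (0, 0, 0)) m)) PySem.Dict.empty mon).keys.Nodup := by
    apply PySem.Dict.nodup_keys_foldl_insert_key mon pvKid (fun d m => pvBStep (d.getD (pvKid m) (0, 0, 0)) m)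
    simp [PySem.Dict.keys_empty]
  rw [PySem.Dict.items_eq_map_keys _ hnd (0, 0, 0)]
  rw [PySem.Dict.keys_foldl_insert_key mon pvKid (fun d m => pvBStep (d.getD (pvKid m) (0, 0, 0)) m)]
  rw [PySem.Dict.keys_empty, PySem.Set.update_nil_left]
  apply List.map_congr_left
  intro k _
  rw [pv_getD_bfold, PySem.Dict.getD_empty]
  rfl

theorem compute_keyword_changes_py_spec : Claim_equal_compute_keyword_changes_py := by
  unfold Claim_equal_compute_keyword_changes_py
  intro mon _ _
  unfold Spec_compute_keyword_changes_py
  simp only [compute_keyword_changes_py, compute_keyword_changes_py_alt]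
  rw [pv_itemsA mon, pv_itemsB mon]
  rw [List.foldl_map, List.filterMap_map]
  rw [pv_foldl_guard]
  rw [List.nil_append]
  congr 1
  apply List.filterMap_congr
  intro k _
  exact pv_item_eq k (mon.filter (fun m => pvKid m == k))
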